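-- pv_equiv track=rewrite | github.com/Bodichelly/DataBaseTermSix | Lab1/Utils/utils.py | normalize_link_array
-- ===== SOURCE A (Python) =====
-- def delete_duplicates(array):
--     return list(dict.fromkeys(array))
--
-- def normalize_link_array(link_array, url_arr):
--     result_arr = []
--     for link_ in link_array:
--         for url_ in url_arr:
--             if str(link_).startswith(url_) and str(link_) != url_:
--                 result_arr.append(link_)
--                 break
--     return delete_duplicates(result_arr)[:20]
-- ===== SOURCE B (Python) =====
-- def normalize_link_array(link_array, url_arr):
--     # Single pass with a seen-set and early exit once 20 distinct matches are found.
--     seen = set()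
--     result = []
--     for link_ in link_array:
--         if len(result) == 20:
--             break
--         s = str(link_)
--         if s not in seen and any(s.startswith(url_) and s != url_ for url_ in url_arr):
--             seen.add(s)
--             result.append(link_)
--     return result
-- ===== Notes on version B (the rewrite author's own statement) =====
-- stated objective: alternative
-- what changed: Instead of collecting all matches with a break-style inner loop and then deduplicating and slicing to 20, B makes one pass keeping a seen-set and appends at most 20 distinct matching links, stopping as soon as 20 are found.
import Mathlib
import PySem

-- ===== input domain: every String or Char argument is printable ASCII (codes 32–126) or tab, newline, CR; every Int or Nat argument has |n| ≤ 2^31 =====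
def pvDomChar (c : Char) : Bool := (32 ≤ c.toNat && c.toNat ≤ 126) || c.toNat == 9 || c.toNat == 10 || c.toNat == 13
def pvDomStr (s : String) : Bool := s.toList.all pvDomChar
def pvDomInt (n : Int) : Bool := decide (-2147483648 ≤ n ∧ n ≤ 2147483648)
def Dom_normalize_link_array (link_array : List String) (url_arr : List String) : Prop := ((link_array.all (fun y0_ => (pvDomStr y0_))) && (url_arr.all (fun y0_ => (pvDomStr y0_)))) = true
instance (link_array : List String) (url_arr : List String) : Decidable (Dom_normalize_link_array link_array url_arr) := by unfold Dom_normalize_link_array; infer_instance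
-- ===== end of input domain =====

-- B replaces A's collect-all / dedup-after / slice pipeline by a single pass with a seen-set
-- that stops as soon as 20 distinct matching links have been collected.


-- ===== PORT A =====
-- inner 'for url_ in url_arr: if cond: append; break'
def pvInnerA (link : String) (urls : List String) (res : List String) : List String :=
  match urls with
  | [] => res
  | u :: rest =>
      if PySem.Str.startswith link u && link != u then res ++ [link]
      else pvInnerA link rest res

def normalize_link_array (link_array : List String) (url_arr : List String) : List String :=
  let result_arr := link_array.foldl (fun res link_ => pvInnerA link_ url_arr res) []
  -- delete_duplicates = list(dict.fromkeys(·)) = PySem.List.dedup; [:20] = take 20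
  (PySem.List.dedup result_arr).take 20

-- ===== PORT B =====
def pvMatchB (urls : List String) (s : String) : Bool :=
  urls.any (fun u => PySem.Str.startswith s u && s != u)

def pvLoopB (urls : List String) : List String → PySem.Set String → List String → List String
  | [], _, res => res
  | link_ :: rest, seen, res =>
      if res.length == 20 then res
      else if !(PySem.Set.contains seen link_) && pvMatchB urls link_ then
        pvLoopB urls rest (PySem.Set.add seen link_) (res ++ [link_])
      else
        pvLoopB urls rest seen res

def normalize_link_array_alt (link_array : List String) (url_arr : List String) : List String :=
  pvLoopB url_arr link_array PySem.Set.empty []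

-- ===== PRECONDITION & SPEC =====
def Spec_normalize_link_array (link_array : List String) (url_arr : List String) (out : List String) : Prop := out = normalize_link_array_alt link_array url_arr
instance (link_array : List String) (url_arr : List String) (out : List String) : Decidable (Spec_normalize_link_array link_array url_arr out) := by unfold Spec_normalize_link_array; infer_instance

-- ===== CLAIM (what is proved, stated in full; the proofs are below) =====
def Claim_equal_normalize_link_array : Prop := ∀ (link_array : List String) (url_arr : List String), Dom_normalize_link_array link_array url_arr → Spec_normalize_link_array link_array url_arr (normalize_link_array link_array url_arr)

-- ===== LEMMAS AND PROOFS =====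

-- the new (not-yet-seen) elements of xs, in order of first occurrence
def pvDedupFrom (seen : PySem.Set String) : List String → List String
  | [] => []
  | x :: xs =>
      if PySem.Set.contains seen x then pvDedupFrom seen xs
      else x :: pvDedupFrom (PySem.Set.add seen x) xs

theorem pvInnerA_eq (link : String) (urls : List String) (res : List String) :
    pvInnerA link urls res = if pvMatchB urls link then res ++ [link] else res := by
  induction urls with
  | nil => simp [pvInnerA, pvMatchB]
  | cons u rest ih =>
      cases hc : (PySem.Str.startswith link u && link != u) with
      | true =>
          simp only [pvInnerA, pvMatchB, List.any_cons, hc, Bool.true_or, if_true]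
      | false =>
          simp only [pvInnerA, pvMatchB, List.any_cons, hc, Bool.false_or]
          simpa only [pvMatchB] using ih

theorem pvFoldAdd (xs : List String) (seen : PySem.Set String) :
    List.foldl PySem.Set.add seen xs = seen ++ pvDedupFrom seen xs := by
  induction xs generalizing seen with
  | nil => simp [pvDedupFrom]
  | cons x xs ih =>
      by_cases h : x ∈ seen
      · simp [pvDedupFrom, PySem.Set.add, h, ih]
      · simp [pvDedupFrom, PySem.Set.add, h, ih]

theorem pvLoopB_eq (urls : List String) (links : List String) (seen : PySem.Set String)
    (res : List String) (hres : res.length ≤ 20) :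
    pvLoopB urls links seen res =
      res ++ (pvDedupFrom seen (links.filter (pvMatchB urls))).take (20 - res.length) := by
  induction links generalizing seen res with
  | nil => simp [pvLoopB, pvDedupFrom]
  | cons l rest ih =>
      simp only [pvLoopB, List.filter_cons]
      by_cases h20 : (res.length == 20) = true
      · have hl : res.length = 20 := by simpa using h20
        simp [hl]
      · have h20' : (res.length == 20) = false := by simpa using h20
        have hlt : res.length < 20 := Nat.lt_of_le_of_ne hres (by simpa using h20)
        cases hm : pvMatchB urls l with
        | false =>
            rw [ih seen res hres]
            simp [h20']
        | true =>
            cases hc1 : PySem.Set.contains seen l with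
            | true =>
                have hmem : l ∈ seen := by simpa using hc1
                rw [ih seen res hres]
                simp [h20', pvDedupFrom, hmem]
            | false =>
                have hlen : (res ++ [l]).length ≤ 20 := by simp; omega
                rw [ih (PySem.Set.add seen l) (res ++ [l]) hlen]
                have htake : 20 - res.length = (20 - (res ++ [l]).length) + 1 := by
                  simp; omega
                simp only [h20', hc1, Bool.not_false, Bool.true_and, if_true,
                  Bool.false_eq_true, if_false, pvDedupFrom]
                rw [htake, List.take_succ_cons, List.append_assoc]
                rfl

theorem ports_agree (link_array url_arr : List String) :
    normalize_link_array link_array url_arr = normalize_link_array_alt link_array url_arr := by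
  unfold normalize_link_array normalize_link_array_alt
  have hfun : (fun res link_ => pvInnerA link_ url_arr res)
      = fun (res : List String) link_ =>
          if pvMatchB url_arr link_ then res ++ [link_] else res :=
    funext fun res => funext fun link_ => pvInnerA_eq link_ url_arr res
  rw [hfun, PySem.List.foldl_append_if_eq_filter,
    pvLoopB_eq url_arr link_array PySem.Set.empty [] (by simp)]
  simp [PySem.Set.ofList_eq_foldl, pvFoldAdd, PySem.Set.empty]

-- ===== VERDICT (by name: the statement is the Claim_ definition above) =====
theorem normalize_link_array_spec : Claim_equal_normalize_link_array := by
  intro la ua _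
  unfold Spec_normalize_link_array
  exact ports_agree la ua
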